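-- pv_equiv track=rewrite | github.com/XuanRen4470/SPPL | evaluation/eval.py | find_first_number
-- ===== SOURCE A (Python) =====
-- def find_first_number(text, numbers=[1, 2, 3, 4, 5]):
--     # Initialize variables to store the first number and its index
--     first_number = None
--     first_index = len(text)  # Start with the highest possible index
--
--     # Loop through the numbers to find which appears first
--     for number in numbers:
--         index = text.find(str(number))
--         # Check if the number is found and appears before the current first number
--         if index != -1 and index < first_index:
--             first_number = str(number)
--             first_index = index
--
--     # Return the first number, or "null" if none of the numbers are found
--     return first_number if first_number else "null"
-- ===== SOURCE B (Python) =====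
-- def find_first_number(text, numbers=[1, 2, 3, 4, 5]):
--     # Single left-to-right scan over text positions; at each position test the
--     # candidate number strings in list order, so the earliest position wins and
--     # ties go to list order, exactly as A's per-number find/min does.
--     strs = [str(n) for n in numbers]
--     for i in range(len(text)):
--         for s in strs:
--             if text.startswith(s, i):
--                 return s
--     return "null"
-- ===== Notes on version B (the rewrite author's own statement) =====
-- stated objective: alternative
-- what changed: Replaces A's per-number text.find scans with running minimum index by a single position-major left-to-right scan of the text that tests the candidate strings in list order at each position and returns at the first match.
import Mathlib
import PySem

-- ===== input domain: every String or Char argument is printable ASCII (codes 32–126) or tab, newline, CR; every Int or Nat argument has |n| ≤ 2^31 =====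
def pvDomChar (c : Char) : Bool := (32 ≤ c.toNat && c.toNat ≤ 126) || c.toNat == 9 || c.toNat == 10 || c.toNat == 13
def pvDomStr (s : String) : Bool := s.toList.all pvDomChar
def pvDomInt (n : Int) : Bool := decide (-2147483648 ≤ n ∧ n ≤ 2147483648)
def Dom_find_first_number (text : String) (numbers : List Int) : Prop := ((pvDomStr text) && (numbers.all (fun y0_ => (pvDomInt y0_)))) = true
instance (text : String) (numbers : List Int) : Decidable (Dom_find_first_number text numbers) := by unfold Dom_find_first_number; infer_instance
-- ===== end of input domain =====

-- B replaces A's per-number `text.find` scans (keeping a running minimum index) with a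
-- single position-major scan of the text, testing the candidate strings in list order
-- at each position; same return value everywhere (objective: alternative algorithm).

-- ===== PORT A =====
def find_first_number (text : String) (numbers : List Int) : String :=
  -- first_number = None; first_index = len(text)
  let st := numbers.foldl (fun (st : Option String × Int) number =>
    let index := PySem.Str.find text (PySem.Int.toStr number)
    if index ≠ -1 ∧ index < st.2 then (some (PySem.Int.toStr number), index) else st)
    (none, PySem.Str.len text)
  -- return first_number if first_number else "null"  (truthiness: None or "" → "null")
  match st.1 with
  | some s => if s = "" then "null" else s
  | none => "null"

-- ===== PORT B =====
-- inner loop: for s in strs: if suffix.startswith(s): return s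
def ffnInner (suffix : List Char) : List String → Option String
  | [] => none
  | s :: ss => if PySem.Chars.startswith suffix s.toList then some s else ffnInner suffix ss

-- outer loop: for i in range(len(text)): …; the recursion carries text[i:] as the list
-- suffix, so text.startswith(s, i) is Chars.startswith on that suffix (exact)
def ffnOuter (strs : List String) : List Char → String
  | [] => "null"
  | c :: rest =>
    match ffnInner (c :: rest) strs with
    | some s => s
    | none => ffnOuter strs rest

def find_first_number_alt (text : String) (numbers : List Int) : String :=
  ffnOuter (numbers.map PySem.Int.toStr) text.toList

-- ===== PRECONDITION & SPEC =====
def Spec_find_first_number (text : String) (numbers : List Int) (out : String) : Prop := out = find_first_number_alt text numbers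
instance (text : String) (numbers : List Int) (out : String) : Decidable (Spec_find_first_number text numbers out) := by unfold Spec_find_first_number; infer_instance

-- ===== CLAIM (what is proved, stated in full; the proofs are below) =====
def Claim_equal_find_first_number : Prop := ∀ (text : String) (numbers : List Int), Dom_find_first_number text numbers → Spec_find_first_number text numbers (find_first_number text numbers)

-- ===== LEMMAS AND PROOFS =====

theorem toDigitsCore_len_ge (b : Nat) : ∀ (f n : Nat) (l : List Char),
    l.length ≤ (Nat.toDigitsCore b f n l).length := by
  intro f
  induction f with
  | zero => intro n l; simp [Nat.toDigitsCore]
  | succ f ih =>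
    intro n l
    simp only [Nat.toDigitsCore]
    split
    · simp
    · exact le_trans (by simp) (ih _ _)

theorem toChars_ne_nil (n : Int) : PySem.Int.toChars n ≠ [] := by
  unfold PySem.Int.toChars
  split
  · simp
  · unfold Nat.toDigits
    simp only [Nat.toDigitsCore]
    split
    · simp
    · intro h
      have := toDigitsCore_len_ge 10 n.toNat (n.toNat / 10) [Nat.digitChar (n.toNat % 10)]
      rw [h] at this; simp at this

-- ffnInner returns a member of strs that is a prefix of suffix
theorem ffnInner_some (suffix : List Char) (strs : List String) (s : String)
    (h : ffnInner suffix strs = some s) : s ∈ strs ∧ s.toList <+: suffix := by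
  induction strs with
  | nil => simp [ffnInner] at h
  | cons t ts ih =>
    simp only [ffnInner] at h
    split at h
    · rename_i ht
      obtain rfl : t = s := by simpa using h
      exact ⟨by simp, (PySem.Chars.startswith_iff _ _).mp ht⟩
    · obtain ⟨h1, h2⟩ := ih h
      exact ⟨by simp [h1], h2⟩

theorem ffnInner_none (suffix : List Char) (strs : List String)
    (h : ∀ s ∈ strs, ¬ s.toList <+: suffix) : ffnInner suffix strs = none := by
  induction strs with
  | nil => rfl
  | cons s ss ih =>
    simp only [ffnInner]
    rw [if_neg, ih]
    · intro t ht; exact h t (by simp [ht])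
    · simp only [PySem.Chars.startswith_iff]; exact h s (by simp)

-- if no string matches at any position, outer returns "null"
theorem ffnOuter_null (strs : List String) : ∀ (l : List Char),
    (∀ (i : Nat), ∀ s ∈ strs, ¬ s.toList <+: l.drop i) → ffnOuter strs l = "null" := by
  intro l
  induction l with
  | nil => intro _; rfl
  | cons c rest ih =>
    intro h
    simp only [ffnOuter]
    rw [ffnInner_none _ _ (by simpa using h 0)]
    exact ih (fun i s hs => by simpa using h (i + 1) s hs)

-- if position j is the first position where anything matches, outer returns ffnInner there
theorem ffnOuter_hit (strs : List String) : ∀ (l : List Char) (j : Nat) (s : String),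
    ffnInner (l.drop j) strs = some s →
    (∀ i < j, ∀ t ∈ strs, ¬ t.toList <+: l.drop i) →
    (∀ t ∈ strs, t.toList ≠ []) →
    ffnOuter strs l = s := by
  intro l
  induction l with
  | nil =>
    intro j s hj _ hne
    obtain ⟨hmem, hpref⟩ := ffnInner_some _ _ _ hj
    simp only [List.drop_nil] at hpref
    exact absurd (List.prefix_nil.mp hpref) (hne s hmem)
  | cons c rest ih =>
    intro j s hj hbefore hne
    match j with
    | 0 =>
      simp only [List.drop_zero] at hj
      simp only [ffnOuter, hj]
    | j' + 1 =>
      simp only [ffnOuter]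
      rw [ffnInner_none _ _ (by simpa using hbefore 0 (Nat.succ_pos _))]
      exact ih j' s (by simpa using hj)
        (fun i hi t ht => by simpa using hbefore (i + 1) (by omega) t ht) hne

-- bestOf ns = the (string, index) pair A's loop would keep, starting from index bound +∞
def bestOf (chars : List Char) : List Int → Option (String × Nat)
  | [] => none
  | n :: ns =>
    let r := bestOf chars ns
    let idx := PySem.Chars.find chars (PySem.Int.toChars n)
    if idx ≠ -1 ∧ (∀ p ∈ r, idx ≤ (p.2 : Int)) then some (PySem.Int.toStr n, idx.toNat) else r

-- A's fold, from an arbitrary accumulator, in terms of bestOf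
theorem foldA_eq (chars : List Char) (text : String) (htext : text.toList = chars) :
    ∀ (ns : List Int) (fn : Option String) (fi : Int),
    (ns.foldl (fun (st : Option String × Int) number =>
      let index := PySem.Str.find text (PySem.Int.toStr number)
      if index ≠ -1 ∧ index < st.2 then (some (PySem.Int.toStr number), index) else st)
      (fn, fi))
    = (bestOf chars ns).elim (fn, fi)
        (fun p => if (p.2 : Int) < fi then (some p.1, (p.2 : Int)) else (fn, fi)) := by
  intro ns
  induction ns with
  | nil => intro fn fi; rfl
  | cons n ns ih =>
    intro fn fi
    simp only [List.foldl_cons, bestOf]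
    rw [PySem.Str.find_eq, htext, PySem.Int.toList_toStr]
    set idx := PySem.Chars.find chars (PySem.Int.toChars n) with hidx
    have hge : -1 ≤ idx := PySem.Chars.neg_one_le_find chars (PySem.Int.toChars n)
    by_cases h1 : idx ≠ -1 ∧ idx < fi
    · rw [if_pos h1, ih]
      have hc : ((idx.toNat : Int)) = idx := Int.toNat_of_nonneg (by omega)
      cases hb : bestOf chars ns with
      | none =>
        rw [if_pos ⟨h1.1, by simp⟩]
        simp only [Option.elim]
        rw [hc, if_pos h1.2]
      | some p =>
        obtain ⟨s, j⟩ := p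
        by_cases h2 : idx ≤ (j : Int)
        · rw [if_pos ⟨h1.1, by simpa using h2⟩]
          simp only [Option.elim]
          rw [hc, if_neg (by omega), if_pos h1.2]
        · rw [if_neg (fun hcond => h2 (by simpa using hcond.2 (s, j) (by simp)))]
          simp only [Option.elim]
          rw [if_pos (by omega), if_pos (by omega)]
    · rw [if_neg h1, ih]
      cases hb : bestOf chars ns with
      | none =>
        by_cases h0 : idx = -1
        · rw [if_neg (fun hcond => hcond.1 h0)]
        · have hc : ((idx.toNat : Int)) = idx := Int.toNat_of_nonneg (by omega)
          rw [if_pos ⟨h0, by simp⟩]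
          simp only [Option.elim]
          rw [hc, if_neg (by omega)]
      | some p =>
        obtain ⟨s, j⟩ := p
        by_cases h0 : idx = -1
        · rw [if_neg (fun hcond => hcond.1 h0)]
        · have hc : ((idx.toNat : Int)) = idx := Int.toNat_of_nonneg (by omega)
          by_cases h2 : idx ≤ (j : Int)
          · rw [if_pos ⟨h0, by simpa using h2⟩]
            simp only [Option.elim]
            rw [hc, if_neg (by omega), if_neg (by omega)]
          · rw [if_neg (fun hcond => h2 (by simpa using hcond.2 (s, j) (by simp)))]

-- helper: a prefix of some drop is an infix
theorem prefix_drop_infix {sub l : List Char} {i : Nat} (h : sub <+: l.drop i) :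
    sub <:+: l :=
  h.isInfix.trans (List.drop_suffix i l).isInfix

-- bestOf is exactly "first position with a match, first matching string there"
theorem bestOf_spec (chars : List Char) : ∀ (ns : List Int),
    (match bestOf chars ns with
     | none => ∀ (i : Nat), ∀ s ∈ ns.map PySem.Int.toStr, ¬ s.toList <+: chars.drop i
     | some (s, j) => ffnInner (chars.drop j) (ns.map PySem.Int.toStr) = some s ∧
         j < chars.length ∧
         ∀ i < j, ∀ t ∈ ns.map PySem.Int.toStr, ¬ t.toList <+: chars.drop i) := by
  intro ns
  induction ns with
  | nil => intro i s hs; simp at hs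
  | cons n ns ih =>
    simp only [bestOf]
    set idx := PySem.Chars.find chars (PySem.Int.toChars n) with hidx
    have hge : -1 ≤ idx := PySem.Chars.neg_one_le_find chars (PySem.Int.toChars n)
    by_cases h0 : idx = -1
    · -- toChars n never occurs anywhere in chars
      have hnone : ∀ (i : Nat), ¬ PySem.Int.toChars n <+: chars.drop i := by
        intro i hp
        exact (PySem.Chars.find_eq_neg_one_iff chars (PySem.Int.toChars n)).mp h0
          (prefix_drop_infix hp)
      rw [if_neg (fun hcond => hcond.1 h0)]
      cases hb : bestOf chars ns with
      | none =>
        rw [hb] at ih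
        intro i s hs
        simp only [List.map_cons, List.mem_cons] at hs
        rcases hs with hs | hs
        · rw [hs, PySem.Int.toList_toStr]; exact hnone i
        · exact ih i s hs
      | some p =>
        obtain ⟨s, j⟩ := p
        rw [hb] at ih
        obtain ⟨hin, hlt, hbef⟩ := ih
        refine ⟨?_, hlt, ?_⟩
        · simp only [List.map_cons, ffnInner]
          rw [if_neg, hin]
          simp only [PySem.Chars.startswith_iff]
          rw [PySem.Int.toList_toStr]; exact hnone j
        · intro i hi t ht
          simp only [List.map_cons, List.mem_cons] at ht
          rcases ht with ht | ht
          · rw [ht, PySem.Int.toList_toStr]; exact hnone i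
          · exact hbef i hi t ht
    · -- idx ≥ 0 : toChars n first occurs at idx.toNat
      have hpos : 0 ≤ idx := by omega
      obtain ⟨hpref, hmin⟩ := PySem.Chars.find_spec (s := chars) (sub := PySem.Int.toChars n) hpos
      rw [← hidx] at hpref hmin
      have hlen : idx.toNat < chars.length := by
        by_contra hc
        rw [List.drop_eq_nil_of_le (by omega)] at hpref
        exact toChars_ne_nil n (List.prefix_nil.mp hpref)
      by_cases h2 : ∀ p ∈ bestOf chars ns, idx ≤ (p.2 : Int)
      · rw [if_pos ⟨h0, h2⟩]
        refine ⟨?_, hlen, ?_⟩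
        · simp only [List.map_cons, ffnInner]
          rw [if_pos]
          simp only [PySem.Chars.startswith_iff]
          rw [PySem.Int.toList_toStr]; exact hpref
        · intro i hi t ht
          simp only [List.map_cons, List.mem_cons] at ht
          rcases ht with ht | ht
          · rw [ht, PySem.Int.toList_toStr]; exact hmin i hi
          · cases hb : bestOf chars ns with
            | none =>
              rw [hb] at ih; exact ih i t ht
            | some p =>
              obtain ⟨s, j⟩ := p
              rw [hb] at ih
              have hj := h2 (s, j) (by simp [hb])
              exact ih.2.2 i (by simp at hj; omega) t ht
      · rw [if_neg (fun hcond => h2 hcond.2)]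
        cases hb : bestOf chars ns with
        | none => exact absurd (by rintro p hp; rw [hb] at hp; simp at hp) h2
        | some q =>
          have hplt : (q.2 : Int) < idx := by
            by_contra hle
            exact h2 (by
              rintro p hp
              rw [hb, Option.mem_def, Option.some.injEq] at hp
              subst hp
              omega)
          rw [hb] at ih
          obtain ⟨s, j⟩ := q
          obtain ⟨hin, hlt, hbef⟩ := ih
          refine ⟨?_, hlt, ?_⟩
          · simp only [List.map_cons, ffnInner]
            rw [if_neg, hin]
            simp only [PySem.Chars.startswith_iff]
            rw [PySem.Int.toList_toStr]
            exact hmin j (by omega)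
          · intro i hi t ht
            simp only [List.map_cons, List.mem_cons] at ht
            rcases ht with ht | ht
            · rw [ht, PySem.Int.toList_toStr]; exact hmin i (by omega)
            · exact hbef i hi t ht

-- ===== VERDICT (by name: the statement is the Claim_ definition above) =====
theorem find_first_number_spec : Claim_equal_find_first_number := by
  intro text numbers _
  unfold Spec_find_first_number find_first_number find_first_number_alt
  have hne : ∀ t ∈ numbers.map PySem.Int.toStr, t.toList ≠ [] := by
    intro t ht
    simp only [List.mem_map] at ht
    obtain ⟨n, _, rfl⟩ := ht
    rw [PySem.Int.toList_toStr]; exact toChars_ne_nil n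
  rw [foldA_eq text.toList text rfl]
  have hspec := bestOf_spec text.toList numbers
  cases hb : bestOf text.toList numbers with
  | none =>
    rw [hb] at hspec
    exact (ffnOuter_null _ _ (fun i s hs => hspec i s hs)).symm
  | some p =>
    obtain ⟨s, j⟩ := p
    rw [hb] at hspec
    obtain ⟨hin, hlen, hbef⟩ := hspec
    have hfi : (j : Int) < PySem.Str.len text := by
      have hl : PySem.Str.len text = (text.toList.length : Int) := by
        simp [PySem.Str.len]
      omega
    simp only [Option.elim]
    rw [if_pos hfi]
    have hsne : s ≠ "" := by
      intro hc
      exact hne s (ffnInner_some _ _ _ hin).1 (by simp [hc])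
    show (if s = "" then "null" else s) = _
    rw [if_neg hsne, ffnOuter_hit _ text.toList j s hin hbef hne]
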